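-- pv_equiv track=rewrite | github.com/Sebaxdenc/Deliverie1-Artificial-Intelligence- | ga_horario_semana.py | longitudes_contiguas
-- ===== SOURCE A (Python) =====
-- def longitudes_contiguas(vec, etiqueta):
--     """Calcula longitudes de bloques contiguos"""
--     longitudes, actual = [], 0
--     for x in vec:
--         if x == etiqueta:
--             actual += 1
--         else:
--             if actual > 0:
--                 longitudes.append(actual)
--             actual = 0
--     if actual > 0:
--         longitudes.append(actual)
--     return longitudes
-- ===== SOURCE B (Python) =====
-- def longitudes_contiguas(vec, etiqueta):
--     """Calcula longitudes de bloques contiguos"""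
--     flags = [x == etiqueta for x in vec]
--     n = len(flags)
--     res = []
--     i = 0
--     while i < n:
--         j = i
--         while j < n and flags[j] == flags[i]:
--             j += 1
--         if flags[i]:
--             res.append(j - i)
--         i = j
--     return res
-- ===== Notes on version B (the rewrite author's own statement) =====
-- stated objective: alternative
-- what changed: B precomputes a boolean flag list and scans it with a run-jumping outer loop (finding each maximal run at once) and collects lengths of True runs, instead of A's single-pass accumulator with end-of-run flushes.
import Mathlib
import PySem

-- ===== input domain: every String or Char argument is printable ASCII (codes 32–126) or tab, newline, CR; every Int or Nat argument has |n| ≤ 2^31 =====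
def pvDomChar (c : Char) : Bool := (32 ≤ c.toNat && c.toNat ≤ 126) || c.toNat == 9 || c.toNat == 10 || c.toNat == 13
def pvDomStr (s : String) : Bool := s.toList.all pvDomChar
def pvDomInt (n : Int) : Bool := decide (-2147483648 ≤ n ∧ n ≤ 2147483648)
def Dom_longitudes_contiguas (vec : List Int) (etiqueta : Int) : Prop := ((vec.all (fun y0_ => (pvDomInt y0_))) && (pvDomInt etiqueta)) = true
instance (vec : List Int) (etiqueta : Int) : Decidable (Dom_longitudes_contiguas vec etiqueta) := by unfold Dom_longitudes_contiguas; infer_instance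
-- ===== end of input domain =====

-- B replaces A's single-pass accumulator with a precomputed flag list scanned run-by-run (alternative decomposition, same cost).

-- ===== PORT A =====
-- A's for-loop over vec with state (longitudes, actual), branches in source order.
def aLoop (etiqueta : Int) : List Int → List Int → Int → List Int × Int
  | [], longitudes, actual => (longitudes, actual)
  | x :: t, longitudes, actual =>
    if x = etiqueta then aLoop etiqueta t longitudes (actual + 1)
    else if actual > 0 then aLoop etiqueta t (longitudes ++ [actual]) 0
    else aLoop etiqueta t longitudes 0

def longitudes_contiguas (vec : List Int) (etiqueta : Int) : List Int :=
  let s := aLoop etiqueta vec [] 0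
  if s.2 > 0 then s.1 ++ [s.2] else s.1

-- ===== PORT B =====
-- Source B's outer loop: at position i take the maximal run of flags equal to flags[i]
-- (inner while = takeWhile), emit its length if the flag is True, jump past it (dropWhile).
def runsTrue : List Bool → List Int
  | [] => []
  | b :: t =>
    let run := t.takeWhile (fun c => c = b)
    let rest := t.dropWhile (fun c => c = b)
    if b then ((run.length : Int) + 1) :: runsTrue rest else runsTrue rest
termination_by l => l.length
decreasing_by
  all_goals
    simp only [List.length_cons]
    exact Nat.lt_succ_of_le (List.length_dropWhile_le _ _)

def longitudes_contiguas_alt (vec : List Int) (etiqueta : Int) : List Int :=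
  runsTrue (vec.map (fun x => x == etiqueta))

-- ===== PRECONDITION & SPEC =====
def Spec_longitudes_contiguas (vec : List Int) (etiqueta : Int) (out : List Int) : Prop := out = longitudes_contiguas_alt vec etiqueta
instance (vec : List Int) (etiqueta : Int) (out : List Int) : Decidable (Spec_longitudes_contiguas vec etiqueta out) := by unfold Spec_longitudes_contiguas; infer_instance

-- ===== CLAIM (what is proved, stated in full; the proofs are below) =====
def Claim_equal_longitudes_contiguas : Prop := ∀ (vec : List Int) (etiqueta : Int), Dom_longitudes_contiguas vec etiqueta → Spec_longitudes_contiguas vec etiqueta (longitudes_contiguas vec etiqueta)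

-- ===== LEMMAS AND PROOFS =====

-- A's loop restated over the flag list (same recursion, state threaded the same way).
def runsAux (a : Int) : List Bool → List Int
  | [] => if a > 0 then [a] else []
  | true :: t => runsAux (a + 1) t
  | false :: t => if a > 0 then a :: runsAux 0 t else runsAux 0 t

theorem aLoop_eq_runsAux (etiqueta : Int) :
    ∀ (l : List Int) (ls : List Int) (a : Int),
      (if (aLoop etiqueta l ls a).2 > 0 then (aLoop etiqueta l ls a).1 ++ [(aLoop etiqueta l ls a).2]
       else (aLoop etiqueta l ls a).1)
        = ls ++ runsAux a (l.map (fun x => x == etiqueta)) := by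
  intro l
  induction l with
  | nil =>
    intro ls a
    simp only [aLoop, runsAux, List.map_nil]
    split <;> simp
  | cons x t ih =>
    intro ls a
    simp only [aLoop, List.map_cons]
    by_cases hx : x = etiqueta
    · simp only [hx, beq_self_eq_true, runsAux]
      exact ih ls (a + 1)
    · have hb : (x == etiqueta) = false := by simpa using hx
      simp only [if_neg hx, hb, runsAux]
      by_cases ha : a > 0
      · simp only [if_pos ha]
        rw [ih (ls ++ [a]) 0, List.append_assoc]
        rfl
      · simp only [if_neg ha]
        exact ih ls 0

theorem runsTrue_false_cons : ∀ (t : List Bool), runsTrue (false :: t) = runsTrue t := by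
  intro t
  cases t with
  | nil =>
    conv_lhs => rw [runsTrue]
    simp
  | cons b t' =>
    cases b with
    | true =>
      conv_lhs => rw [runsTrue]
      simp [List.dropWhile]
    | false =>
      conv_lhs => rw [runsTrue]
      conv_rhs => rw [runsTrue]
      simp [List.dropWhile]

theorem runsAux_zero_eq_runsTrue : ∀ (flags : List Bool), runsAux 0 flags = runsTrue flags := by
  have key : ∀ (n : ℕ) (flags : List Bool), flags.length ≤ n → ∀ (a : Int), 0 ≤ a →
      runsAux a flags =
        (if 0 < a then (a + ((flags.takeWhile (fun c => c = true)).length : Int))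
            :: runsTrue (flags.dropWhile (fun c => c = true))
         else runsTrue flags) := by
    intro n
    induction n with
    | zero =>
      intro flags hlen a ha
      have hnil : flags = [] := List.eq_nil_of_length_eq_zero (Nat.le_zero.mp hlen)
      subst hnil
      simp only [runsAux, List.takeWhile_nil, List.dropWhile_nil, List.length_nil]
      split
      · next h => simp [runsTrue]
      · next h => simp [runsTrue]
    | succ n ihn =>
      intro flags hlen a ha
      cases flags with
      | nil =>
        simp only [runsAux, List.takeWhile_nil, List.dropWhile_nil, List.length_nil]
        split
        · next h => simp [runsTrue]
        · next h => simp [runsTrue]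
      | cons b t =>
        have hlt : t.length ≤ n := by
          simp only [List.length_cons] at hlen; omega
        cases b with
        | true =>
          simp only [runsAux]
          rw [ihn t hlt (a + 1) (by omega)]
          have hpos : (0:Int) < a + 1 := by omega
          simp only [if_pos hpos, List.takeWhile, List.dropWhile, decide_true]
          by_cases h0 : 0 < a
          · simp only [if_pos h0, List.length_cons]
            congr 1
            push_cast
            ring
          · have ha0 : a = 0 := by omega
            subst ha0
            simp only [if_neg h0]
            conv_rhs => rw [runsTrue]
            simp only [if_true]
            congr 1
            push_cast
            ring
        | false =>
          simp only [runsAux]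
          rw [ihn t hlt 0 (by omega)]
          simp only [lt_irrefl, if_false]
          rw [← runsTrue_false_cons t]
          by_cases h0 : 0 < a
          · simp only [if_pos h0]
            simp [List.takeWhile, List.dropWhile]
          · simp only [if_neg h0]
  intro flags
  rw [key flags.length flags (Nat.le_refl _) 0 (by omega)]
  simp

-- ===== VERDICT (by name: the statement is the Claim_ definition above) =====
theorem longitudes_contiguas_spec : Claim_equal_longitudes_contiguas := by
  intro vec etiqueta _
  unfold Spec_longitudes_contiguas longitudes_contiguas longitudes_contiguas_alt
  rw [aLoop_eq_runsAux etiqueta vec [] 0, runsAux_zero_eq_runsTrue]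
  simp
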